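-- pv_equiv track=rewrite | github.com/meta-pytorch/botorch | test/acquisition/test_probabilistic_reparameterization.py | get_categorical_features_dict
-- ===== SOURCE A (Python) =====
-- def get_categorical_features_dict(feature_to_num_categories: dict[int, int]):
--     r"""Get the mapping of starting index in one-hot space to cardinality.
--
--     This mapping is used to construct the OneHotToNumeric transform. This
--     requires that all of the categorical parameters are the rightmost elements.
--
--     Args:
--         feature_to_num_categories: Mapping of feature index to cardinality in the
--             untransformed space.
--
--     """
--     start = None
--     categorical_features = {}
--     for idx, cardinality in sorted(
--         feature_to_num_categories.items(), key=lambda kv: kv[0]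
--     ):
--         if start is None:
--             start = idx
--         categorical_features[start] = cardinality
--         # add cardinality to start
--         start += cardinality
--     return categorical_features
-- ===== SOURCE B (Python) =====
-- def get_categorical_features_dict(feature_to_num_categories):
--     items = sorted(feature_to_num_categories.items(), key=lambda kv: kv[0])
--     if not items:
--         return {}
--     # one-hot end position of the last categorical block
--     end = items[0][0] + sum(c for _, c in items)
--     pairs = []
--     for _, c in reversed(items):
--         end -= c
--         pairs.append((end, c))
--     return dict(reversed(pairs))
-- ===== Notes on version B (the rewrite author's own statement) =====
-- stated objective: alternative
-- what changed: A accumulates start offsets forward with a running variable while inserting; B precomputes the total end offset (first index + sum of all cardinalities) and walks the sorted items backwards, deriving each start by subtracting its cardinality from the running end, then builds the dict from the reversed pair list.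
import Mathlib
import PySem

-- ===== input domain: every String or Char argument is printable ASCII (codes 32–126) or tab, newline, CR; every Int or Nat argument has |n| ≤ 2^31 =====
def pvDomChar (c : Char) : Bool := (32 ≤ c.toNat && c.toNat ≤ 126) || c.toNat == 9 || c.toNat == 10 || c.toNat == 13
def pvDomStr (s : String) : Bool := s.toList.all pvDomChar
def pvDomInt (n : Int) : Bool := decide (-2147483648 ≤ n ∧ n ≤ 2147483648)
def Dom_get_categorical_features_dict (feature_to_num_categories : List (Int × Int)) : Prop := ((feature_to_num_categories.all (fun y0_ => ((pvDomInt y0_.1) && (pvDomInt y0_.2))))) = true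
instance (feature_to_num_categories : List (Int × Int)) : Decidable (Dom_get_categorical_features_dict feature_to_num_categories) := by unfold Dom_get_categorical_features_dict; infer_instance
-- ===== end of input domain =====

-- B replaces A's forward running-offset loop by: precompute the total end offset, walk the
-- sorted items BACKWARDS subtracting each cardinality, then build the dict from the reversed
-- pairs (objective: alternative decomposition, same cost).

-- ===== PORT A =====
def get_categorical_features_dict (feature_to_num_categories : List (Int × Int)) : List (Int × Int) :=
  let srt := PySem.List.sorted (PySem.Dict.ofList feature_to_num_categories).items (fun kv => kv.1) false
  let fin := srt.foldl
    (fun (st : Option Int × PySem.Dict Int Int) kv =>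
      let s := st.1.getD kv.1                      -- if start is None: start = idx
      (some (s + kv.2), st.2.insert s kv.2))       -- categorical_features[start] = cardinality; start += cardinality
    ((none : Option Int), PySem.Dict.empty)
  fin.2.items

-- ===== PORT B =====
def get_categorical_features_dict_alt (feature_to_num_categories : List (Int × Int)) : List (Int × Int) :=
  let items := PySem.List.sorted (PySem.Dict.ofList feature_to_num_categories).items (fun kv => kv.1) false
  match items with
  | [] => []
  | (base, _) :: _ =>
    let e0 := base + (items.map (·.2)).sum                -- end = items[0][0] + sum(c for _, c in items)
    let fin := items.reverse.foldl                        -- for _, c in reversed(items): end -= c; pairs.append((end, c))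
      (fun (st : Int × List (Int × Int)) kv =>
        (st.1 - kv.2, st.2 ++ [(st.1 - kv.2, kv.2)]))
      (e0, ([] : List (Int × Int)))
    (PySem.Dict.ofList fin.2.reverse).items               -- dict(reversed(pairs))

-- ===== PRECONDITION & SPEC =====
def Spec_get_categorical_features_dict (feature_to_num_categories : List (Int × Int)) (out : List (Int × Int)) : Prop := out = get_categorical_features_dict_alt feature_to_num_categories
instance (feature_to_num_categories : List (Int × Int)) (out : List (Int × Int)) : Decidable (Spec_get_categorical_features_dict feature_to_num_categories out) := by unfold Spec_get_categorical_features_dict; infer_instance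

-- ===== CLAIM (what is proved, stated in full; the proofs are below) =====
def Claim_equal_get_categorical_features_dict : Prop := ∀ (feature_to_num_categories : List (Int × Int)), Dom_get_categorical_features_dict feature_to_num_categories → Spec_get_categorical_features_dict feature_to_num_categories (get_categorical_features_dict feature_to_num_categories)

-- ===== LEMMAS AND PROOFS =====

-- the (start, cardinality) pairs produced from a running offset, front to back
def pvPairsFrom (s : Int) : List Int → List (Int × Int)
  | [] => []
  | c :: t => (s, c) :: pvPairsFrom (s + c) t

-- A's loop: the dict built is the sequential insertion of exactly those pairs
theorem pvFoldA_eq (l : List (Int × Int)) (s : Int) (d : PySem.Dict Int Int) :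
    (l.foldl
      (fun (st : Option Int × PySem.Dict Int Int) kv =>
        let s := st.1.getD kv.1
        (some (s + kv.2), st.2.insert s kv.2))
      (some s, d)).2
    = (pvPairsFrom s (l.map (·.2))).foldl (fun d p => d.insert p.1 p.2) d := by
  induction l generalizing s d with
  | nil => rfl
  | cons kv t ih =>
    simp only [List.foldl_cons, List.map_cons, pvPairsFrom]
    exact ih (s + kv.2) (d.insert s kv.2)

-- B's loop: walking the items backwards from the total end produces those pairs reversed
theorem pvFoldB_eq (kvs : List (Int × Int)) (base : Int) (pre : List (Int × Int)) :
    kvs.reverse.foldl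
      (fun (st : Int × List (Int × Int)) kv =>
        (st.1 - kv.2, st.2 ++ [(st.1 - kv.2, kv.2)]))
      (base + (kvs.map (·.2)).sum, pre)
    = (base, pre ++ (pvPairsFrom base (kvs.map (·.2))).reverse) := by
  induction kvs generalizing base pre with
  | nil => simp [pvPairsFrom]
  | cons kv t ih =>
    simp only [List.reverse_cons, List.foldl_append, List.map_cons, List.sum_cons, pvPairsFrom,
      List.reverse_cons]
    have : base + (kv.2 + (t.map (·.2)).sum) = (base + kv.2) + (t.map (·.2)).sum := by ring
    rw [this, ih (base + kv.2) pre]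
    simp only [List.foldl_cons, List.foldl_nil]
    have hb : base + kv.2 - kv.2 = base := by ring
    rw [hb, List.append_assoc]

-- sequential insertion of a pair list from the empty dict IS Dict.ofList
theorem pvOfList_eq_foldl (pairs : List (Int × Int)) :
    pairs.foldl (fun (d : PySem.Dict Int Int) p => d.insert p.1 p.2) PySem.Dict.empty
      = PySem.Dict.ofList pairs := by
  rfl

-- ===== VERDICT (by name: the statement is the Claim_ definition above) =====
theorem get_categorical_features_dict_spec : Claim_equal_get_categorical_features_dict := by
  intro l _
  unfold Spec_get_categorical_features_dict get_categorical_features_dict get_categorical_features_dict_alt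
  cases h : PySem.List.sorted (PySem.Dict.ofList l).items (fun kv => kv.1) false with
  | nil => rfl
  | cons hd tl =>
    obtain ⟨i0, c0⟩ := hd
    simp only [List.foldl_cons, Option.getD_none]
    rw [pvFoldA_eq]
    have hL : List.foldl (fun (d : PySem.Dict Int Int) p => d.insert p.1 p.2)
        (PySem.Dict.empty.insert i0 c0) (pvPairsFrom (i0 + c0) (tl.map (·.2)))
        = PySem.Dict.ofList (pvPairsFrom i0 (c0 :: tl.map (·.2))) := by
      rw [← pvOfList_eq_foldl]
      simp [pvPairsFrom]
    rw [hL, pvFoldB_eq ((i0, c0) :: tl) i0 []]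
    simp [pvPairsFrom]
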